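-- pv_equiv track=rewrite | github.com/wwenrr/n_puzzle | src/service/n_puzzle/final_state.py | replace_max_with_zero
-- ===== SOURCE A (Python) =====
-- def replace_max_with_zero(matrix):
--     max_value = float('-inf')  # Giá trị lớn nhất ban đầu
--     max_position = (0, 0)  # Vị trí của phần tử lớn nhất
--
--     # Duyệt qua từng phần tử trong ma trận
--     for i in range(len(matrix)):
--         for j in range(len(matrix[i])):
--             # Nếu tìm thấy phần tử lớn hơn, cập nhật giá trị lớn nhất và vị trí
--             if matrix[i][j] > max_value:
--                 max_value = matrix[i][j]
--                 max_position = (i, j)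
--
--     # Thay thế phần tử lớn nhất bằng 0
--     matrix[max_position[0]][max_position[1]] = 0
--
--     return matrix
-- ===== SOURCE B (Python) =====
-- def replace_max_with_zero(matrix):
--     # value-only first pass with builtin max, then replace the first
--     # occurrence of that value (row-major) and return immediately.
--     m = max(v for row in matrix for v in row)
--     for row in matrix:
--         for j, v in enumerate(row):
--             if v == m:
--                 row[j] = 0
--                 return matrix
--     return matrix
-- ===== Notes on version B (the rewrite author's own statement) =====
-- stated objective: simpler
-- what changed: A tracks the (row, col) position of the running maximum through both nested loops and then indexes back into the matrix; B computes only the maximum value with builtin max over a flattening generator and then replaces the first element equal to it in row-major order, returning immediately.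
-- outside the precondition, e.g. on replace_max_with_zero([[], []]): A raises IndexError, B raises ValueError
import Mathlib
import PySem

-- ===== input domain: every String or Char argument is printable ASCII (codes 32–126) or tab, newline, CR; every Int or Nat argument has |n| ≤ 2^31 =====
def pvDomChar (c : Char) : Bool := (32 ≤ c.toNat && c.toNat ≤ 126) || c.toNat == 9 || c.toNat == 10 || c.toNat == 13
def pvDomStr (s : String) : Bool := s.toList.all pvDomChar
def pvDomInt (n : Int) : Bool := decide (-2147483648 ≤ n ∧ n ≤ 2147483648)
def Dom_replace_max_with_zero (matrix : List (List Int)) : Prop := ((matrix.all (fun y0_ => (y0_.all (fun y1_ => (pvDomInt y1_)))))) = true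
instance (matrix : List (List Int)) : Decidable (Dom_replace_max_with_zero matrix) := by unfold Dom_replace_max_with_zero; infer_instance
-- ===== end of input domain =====

-- B replaces tracking the position of the maximum by a value-only max pass followed by
-- replacing the first occurrence of that value (objective: simpler).  Both A and B mutate
-- the matrix in place in Python; the equivalence proved here is about the return value.

-- ===== PORT A =====
-- inner loop `for j in range(len(matrix[i]))`: state = (max_value : Option Int, max_position);
-- `none` plays float('-inf'), which every int is greater than.
def pvAInner (i : Nat) : Nat → Option Int × Nat × Nat → List Int → Option Int × Nat × Nat
  | _, st, [] => st
  | j, st, v :: t =>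
      let st' : Option Int × Nat × Nat :=
        match st.1 with
        | none => (some v, (i, j))
        | some mv => if mv < v then (some v, (i, j)) else st
      pvAInner i (j+1) st' t

-- outer loop `for i in range(len(matrix))`
def pvAOuter : Nat → Option Int × Nat × Nat → List (List Int) → Option Int × Nat × Nat
  | _, st, [] => st
  | i, st, r :: rs => pvAOuter (i+1) (pvAInner i 0 st r) rs

def replace_max_with_zero (matrix : List (List Int)) : List (List Int) :=
  let st := pvAOuter 0 (none, (0, 0)) matrix
  -- matrix[max_position[0]][max_position[1]] = 0  (in range whenever A returns, i.e. on Pre_)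
  matrix.modify st.2.1 (fun row => row.set st.2.2 0)

-- ===== PORT B =====
-- `row[j] = 0; return matrix` for the first v == m in row-major order
def pvReplaceFirst (m : Int) : List Int → Option (List Int)
  | [] => none
  | v :: t => if v = m then some (0 :: t) else (pvReplaceFirst m t).map (fun t' => v :: t')

def pvReplaceRows (m : Int) : List (List Int) → List (List Int)
  | [] => []
  | r :: rs =>
      match pvReplaceFirst m r with
      | some r' => r' :: rs
      | none => r :: pvReplaceRows m rs

def replace_max_with_zero_alt (matrix : List (List Int)) : List (List Int) :=
  -- m = max(v for row in matrix for v in row); max() raises on empty, outside Pre_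
  match PySem.List.max? (matrix.flatMap (fun r => r)) (fun v => v) with
  | none => matrix
  | some m => pvReplaceRows m matrix

-- ===== PRECONDITION & SPEC =====
-- Pre_ excludes exactly the matrices with no elements (all rows empty): there A raises
-- IndexError (matrix[0][0] = 0) and B raises ValueError (max of empty sequence).
def Pre_replace_max_with_zero (matrix : List (List Int)) : Prop :=
  (matrix.any (fun r => !r.isEmpty)) = true
instance (matrix : List (List Int)) : Decidable (Pre_replace_max_with_zero matrix) := by
  unfold Pre_replace_max_with_zero; infer_instance

def pvWitness_replace_max_with_zero : List (List Int) := [[1, 2], [3]]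

def Spec_replace_max_with_zero (matrix : List (List Int)) (out : List (List Int)) : Prop := out = replace_max_with_zero_alt matrix
instance (matrix : List (List Int)) (out : List (List Int)) : Decidable (Spec_replace_max_with_zero matrix out) := by unfold Spec_replace_max_with_zero; infer_instance

-- ===== CLAIM (what is proved, stated in full; the proofs are below) =====
def Claim_equal_replace_max_with_zero : Prop := ∀ (matrix : List (List Int)), Dom_replace_max_with_zero matrix → Pre_replace_max_with_zero matrix → Spec_replace_max_with_zero matrix (replace_max_with_zero matrix)

-- ===== LEMMAS AND PROOFS =====

theorem pvFoldlMaxCons (b v : Int) (t : List Int) :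
    List.foldl max b (v :: t) = List.foldl max (max b v) t := rfl

theorem pvFoldlMaxOfLe (t : List Int) (b : Int) (h : ∀ w ∈ t, w ≤ b) :
    List.foldl max b t = b := by
  induction t with
  | nil => rfl
  | cons v t ih =>
      rw [pvFoldlMaxCons, max_eq_left (h v (by simp))]
      exact ih (fun w hw => h w (by simp [hw]))

theorem pvFoldlMaxMemCons (t : List Int) (b : Int) : List.foldl max b t ∈ b :: t := by
  induction t generalizing b with
  | nil => simp
  | cons v t ih =>
      rw [pvFoldlMaxCons]
      rcases List.mem_cons.mp (ih (max b v)) with h | h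
      · rw [h]; rcases max_choice b v with h' | h' <;> rw [h'] <;> simp
      · simp [h]

theorem pvFoldlMaxMem (r : List Int) (bv : Int) (h : ∃ v ∈ r, bv < v) :
    List.foldl max bv r ∈ r := by
  rcases List.mem_cons.mp (pvFoldlMaxMemCons r bv) with hm | hm
  · exfalso
    rcases h with ⟨v, hv, hlt⟩
    have := (PySem.List.le_foldl_max r bv).2 v hv
    rw [hm] at this; omega
  · exact hm

theorem pvAInnerLe (row : List Int) (i j : Nat) (bv : Int) (p : Nat × Nat)
    (h : ∀ v ∈ row, v ≤ bv) : pvAInner i j (some bv, p) row = (some bv, p) := by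
  induction row generalizing j with
  | nil => rfl
  | cons v t ih =>
      have hv : ¬ bv < v := by have := h v (by simp); omega
      simp only [pvAInner, if_neg hv]
      exact ih (j+1) (fun w hw => h w (by simp [hw]))

theorem pvAInnerGt (row : List Int) (i j : Nat) (bv : Int) (p : Nat × Nat)
    (h : ∃ v ∈ row, bv < v) :
    pvAInner i j (some bv, p) row =
      (some (List.foldl max bv row),
       (i, j + List.idxOf (List.foldl max bv row) row)) := by
  induction row generalizing j bv p with
  | nil => simp at h
  | cons v t ih =>
      simp only [pvAInner]
      by_cases hbv : bv < v
      · rw [if_pos hbv]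
        have hfold : List.foldl max bv (v :: t) = List.foldl max v t := by
          rw [pvFoldlMaxCons, max_eq_right hbv.le]
        by_cases hwt : ∃ w ∈ t, v < w
        · rw [ih (j+1) v (i, j) hwt, hfold]
          have hne : List.foldl max v t ≠ v := by
            rcases hwt with ⟨w, hw, hlt⟩
            have := (PySem.List.le_foldl_max t v).2 w hw; omega
          have hbeq : (v == List.foldl max v t) = false := beq_eq_false_iff_ne.mpr (Ne.symm hne)
          rw [List.idxOf_cons, hbeq, cond_false]
          simp only [Prod.mk.injEq, true_and]
          omega
        · push Not at hwt
          rw [pvAInnerLe t i (j+1) v (i, j) hwt, hfold, pvFoldlMaxOfLe t v hwt,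
            List.idxOf_cons]
          simp
      · rw [if_neg hbv]
        have hv' : v ≤ bv := by omega
        have h' : ∃ w ∈ t, bv < w := by
          rcases h with ⟨w, hw, hlt⟩
          rcases List.mem_cons.mp hw with e | e
          · exact absurd hlt (by rw [e]; omega)
          · exact ⟨w, e, hlt⟩
        rw [ih (j+1) bv p h']
        have hfold : List.foldl max bv (v :: t) = List.foldl max bv t := by
          rw [pvFoldlMaxCons, max_eq_left hv']
        have hne : List.foldl max bv t ≠ v := by
          rcases h' with ⟨w, hw, hlt⟩
          have := (PySem.List.le_foldl_max t bv).2 w hw; omega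
        have hbeq : (v == List.foldl max bv t) = false := beq_eq_false_iff_ne.mpr (Ne.symm hne)
        rw [hfold, List.idxOf_cons, hbeq, cond_false]
        simp only [Prod.mk.injEq, true_and]
        omega

theorem pvAOuterLe (rows : List (List Int)) (i : Nat) (bv : Int) (p : Nat × Nat)
    (h : ∀ v ∈ rows.flatMap (fun r => r), v ≤ bv) :
    pvAOuter i (some bv, p) rows = (some bv, p) := by
  induction rows generalizing i with
  | nil => rfl
  | cons r rs ih =>
      simp only [pvAOuter]
      rw [pvAInnerLe r i 0 bv p (fun w hw => h w (by simp [hw]))]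
      exact ih (i+1) (fun w hw => h w (by simp only [List.flatMap_cons, List.mem_append]; right; exact hw))

theorem pvReplaceFirstNone (m : Int) (r : List Int) (h : m ∉ r) :
    pvReplaceFirst m r = none := by
  induction r with
  | nil => rfl
  | cons v t ih =>
      have hv : ¬ v = m := by intro e; exact h (by simp [e])
      simp only [pvReplaceFirst, if_neg hv]
      rw [ih (fun hm => h (by simp [hm]))]; rfl

theorem pvReplaceFirstMem (m : Int) (r : List Int) (h : m ∈ r) :
    pvReplaceFirst m r = some (r.set (List.idxOf m r) 0) := by
  induction r with
  | nil => simp at h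
  | cons v t ih =>
      by_cases hv : v = m
      · simp [pvReplaceFirst, hv]
      · have hm : m ∈ t := by
          rcases List.mem_cons.mp h with e | e
          · exact absurd e.symm hv
          · exact e
        simp [pvReplaceFirst, hv, ih hm]

theorem pvModifyZero (r : List Int) (rs : List (List Int)) (f : List Int -> List Int) :
    (r :: rs).modify 0 f = f r :: rs := by simp [List.modify]

theorem pvModifySucc (r : List Int) (rs : List (List Int)) (n : Nat) (f : List Int -> List Int) :
    (r :: rs).modify (n+1) f = r :: rs.modify n f := by simp [List.modify]

-- main characterisation: on a suffix containing an element above the running max,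
-- A's final position is (i + r, c) and zeroing it performs B's first-occurrence replacement
theorem pvMain (rows : List (List Int)) (i : Nat) (bv : Int) (p : Nat × Nat)
    (h : ∃ v ∈ rows.flatMap (fun r => r), bv < v) :
    ∃ r c, pvAOuter i (some bv, p) rows =
        (some (List.foldl max bv (rows.flatMap (fun r => r))), (i + r, c)) ∧
      rows.modify r (fun row => row.set c 0) =
        pvReplaceRows (List.foldl max bv (rows.flatMap (fun r => r))) rows := by
  induction rows generalizing i bv p with
  | nil => simp at h
  | cons r rs ih =>
      have hflat : (r :: rs).flatMap (fun x => x) = r ++ rs.flatMap (fun x => x) :=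
        List.flatMap_cons
      have hsplit : List.foldl max bv ((r :: rs).flatMap (fun x => x)) =
          List.foldl max (List.foldl max bv r) (rs.flatMap (fun x => x)) := by
        rw [hflat, List.foldl_append]
      simp only [pvAOuter]
      by_cases hr : ∃ v ∈ r, bv < v
      · rw [pvAInnerGt r i 0 bv p hr]
        by_cases hrs : ∃ w ∈ rs.flatMap (fun x => x), List.foldl max bv r < w
        · obtain ⟨r', c', heq, hmod⟩ :=
            ih (i+1) (List.foldl max bv r) (i, 0 + List.idxOf (List.foldl max bv r) r) hrs
          refine ⟨r' + 1, c', ?_, ?_⟩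
          · have harith : i + 1 + r' = i + (r' + 1) := by omega
            rw [heq, hsplit, harith]
          · have hnotin : List.foldl max bv ((r :: rs).flatMap (fun x => x)) ∉ r := by
              intro hmem
              have h1 := (PySem.List.le_foldl_max r bv).2 _ hmem
              rcases hrs with ⟨w, hw, hlt⟩
              have h2 := (PySem.List.le_foldl_max (rs.flatMap (fun x => x))
                (List.foldl max bv r)).2 w hw
              rw [← hsplit] at h2
              omega
            rw [pvModifySucc]
            simp only [pvReplaceRows, pvReplaceFirstNone _ _ hnotin]
            rw [hsplit]
            exact congrArg _ hmod
        · push Not at hrs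
          rw [pvAOuterLe rs (i+1) (List.foldl max bv r)
            (i, 0 + List.idxOf (List.foldl max bv r) r) hrs]
          have hm : List.foldl max bv ((r :: rs).flatMap (fun x => x)) = List.foldl max bv r := by
            rw [hsplit, pvFoldlMaxOfLe _ _ hrs]
          refine ⟨0, List.idxOf (List.foldl max bv r) r, ?_, ?_⟩
          · rw [hm]
            simp
          · have hmem : List.foldl max bv r ∈ r := pvFoldlMaxMem r bv hr
            rw [pvModifyZero]
            simp only [pvReplaceRows, hm, pvReplaceFirstMem _ _ hmem]
      · push Not at hr
        rw [pvAInnerLe r i 0 bv p hr]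
        have h' : ∃ w ∈ rs.flatMap (fun x => x), bv < w := by
          rcases h with ⟨w, hw, hlt⟩
          rw [hflat] at hw
          rcases List.mem_append.mp hw with e | e
          · exact absurd hlt (by have := hr w e; omega)
          · exact ⟨w, e, hlt⟩
        obtain ⟨r', c', heq, hmod⟩ := ih (i+1) bv p h'
        have hm : List.foldl max bv ((r :: rs).flatMap (fun x => x)) =
            List.foldl max bv (rs.flatMap (fun x => x)) := by
          rw [hsplit, pvFoldlMaxOfLe r bv hr]
        refine ⟨r' + 1, c', ?_, ?_⟩
        · have harith : i + 1 + r' = i + (r' + 1) := by omega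
          rw [heq, hm, harith]
        · have hnotin : List.foldl max bv ((r :: rs).flatMap (fun x => x)) ∉ r := by
            intro hmem
            rcases h' with ⟨w, hw, hlt⟩
            have h2 := (PySem.List.le_foldl_max (rs.flatMap (fun x => x)) bv).2 w hw
            rw [← hm] at h2
            have := hr _ hmem
            omega
          rw [pvModifySucc]
          simp only [pvReplaceRows, pvReplaceFirstNone _ _ hnotin]
          rw [hm]
          exact congrArg _ hmod

theorem pvNonePos (rows : List (List Int)) (i : Nat) (p : Nat × Nat) (bv : Int)
    (h : ∀ v ∈ rows.flatMap (fun r => r), bv < v) :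
    (pvAOuter i (none, p) rows).2 = (pvAOuter i (some bv, p) rows).2 := by
  induction rows generalizing i p with
  | nil => rfl
  | cons r rs ih =>
      match r with
      | [] =>
          simp only [pvAOuter, pvAInner]
          exact ih (i+1) p (fun w hw => h w (by simpa using hw))
      | v :: t =>
          have hv : bv < v := h v (by simp)
          simp [pvAOuter, pvAInner, hv]

-- ===== VERDICT (by name: the statement is the Claim_ definition above) =====
theorem replace_max_with_zero_spec : Claim_equal_replace_max_with_zero := by
  intro matrix hdom hpre
  unfold Spec_replace_max_with_zero
  have hall : ∀ v ∈ matrix.flatMap (fun r => r), (-2147483649 : Int) < v := by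
    intro v hv
    rcases List.mem_flatMap.mp hv with ⟨r, hr, hvr⟩
    unfold Dom_replace_max_with_zero at hdom
    simp only [List.all_eq_true, pvDomInt, decide_eq_true_eq] at hdom
    have := (hdom r hr) v hvr
    omega
  obtain ⟨x, tl, hflat⟩ : ∃ x tl, matrix.flatMap (fun r => r) = x :: tl := by
    unfold Pre_replace_max_with_zero at hpre
    rcases List.any_eq_true.mp hpre with ⟨r, hr, hrne⟩
    match e : matrix.flatMap (fun r => r) with
    | y :: ys => exact ⟨y, ys, rfl⟩
    | [] =>
        exfalso
        match r, hrne with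
        | v :: t, _ =>
            have : v ∈ matrix.flatMap (fun r => r) :=
              List.mem_flatMap.mpr ⟨v :: t, hr, by simp⟩
            rw [e] at this; simp at this
  have hex : ∃ v ∈ matrix.flatMap (fun r => r), (-2147483649 : Int) < v :=
    ⟨x, by rw [hflat]; simp, hall x (by rw [hflat]; simp)⟩
  obtain ⟨r, c, heq, hmod⟩ := pvMain matrix 0 (-2147483649) (0, 0) hex
  show replace_max_with_zero matrix = replace_max_with_zero_alt matrix
  unfold replace_max_with_zero replace_max_with_zero_alt
  rw [hflat, PySem.List.max?_id_cons]
  have hmB : List.foldl max x tl = List.foldl max (-2147483649) (matrix.flatMap (fun r => r)) := by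
    rw [hflat, pvFoldlMaxCons, max_eq_right (hall x (by rw [hflat]; simp)).le]
  simp only
  rw [pvNonePos matrix 0 (0, 0) (-2147483649) hall, heq]
  simp only [Nat.zero_add]
  rw [hmB, ← hmod]
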